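-- pv_equiv track=rewrite | github.com/dongkam5/python_prac | prac341.py | solution
-- ===== SOURCE A (Python) =====
-- def solution(prices):
--     answer = [0]*(len(prices))
--     lst=[]
--     for i in range (len(prices)):
--         lst.append([i,prices[i]])
--     stack=[]
--     for i in range(len(prices)):
--         if stack:
--             k=prices[i]
--             while stack and stack[-1][1]>k:
--                 x=stack.pop()
--                 answer[x[0]]=(i-x[0])
--         stack.append(lst[i])
--     for ind in range (len(stack)):
--         answer[stack[ind][0]]=(i-stack[ind][0])
--     return answer
-- ===== SOURCE B (Python) =====
-- def solution(prices):
--     n = len(prices)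
--     answer = []
--     for i in range(n):
--         d = n - 1 - i
--         for j in range(i + 1, n):
--             if prices[j] < prices[i]:
--                 d = j - i
--                 break
--         answer.append(d)
--     return answer
-- ===== Notes on version B (the rewrite author's own statement) =====
-- stated objective: alternative
-- what changed: Replaced A's monotonic-stack single pass (plus index-price pair list and final stack flush) with a naive per-index forward scan that finds the first strictly smaller later price, defaulting to (n-1)-i.
import Mathlib
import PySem

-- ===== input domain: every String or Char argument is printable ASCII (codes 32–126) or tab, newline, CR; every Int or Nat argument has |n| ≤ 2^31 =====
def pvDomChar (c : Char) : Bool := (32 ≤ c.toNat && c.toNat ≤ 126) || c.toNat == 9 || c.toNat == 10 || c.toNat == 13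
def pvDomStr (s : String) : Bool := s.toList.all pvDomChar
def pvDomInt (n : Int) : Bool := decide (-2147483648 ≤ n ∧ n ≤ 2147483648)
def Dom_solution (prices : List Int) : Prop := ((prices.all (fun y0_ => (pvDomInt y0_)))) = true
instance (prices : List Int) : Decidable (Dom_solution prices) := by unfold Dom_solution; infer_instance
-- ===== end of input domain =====

-- B replaces A's monotonic-stack single pass by a naive forward scan per index (an alternative
-- decomposition, not faster); the returned lists are proved identical.

-- ===== PORT A =====
-- the `while stack and stack[-1][1] > k: x = stack.pop(); answer[x[0]] = i - x[0]` loop;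
-- the stack is a head-first list (head = Python's stack[-1]).
def popA (i : Nat) (k : Int) : List (Nat × Int) → List Int → List (Nat × Int) × List Int
  | [], ans => ([], ans)
  | (j, v) :: rest, ans =>
    if k < v then popA i k rest (ans.set j ((i : Int) - (j : Int)))
    else ((j, v) :: rest, ans)

-- one iteration of the main `for i in range(len(prices))` loop; lst[i] = [i, prices[i]]
def stepA (prices : List Int) (st : List (Nat × Int) × List Int) (i : Nat) :
    List (Nat × Int) × List Int :=
  let s := if st.1.isEmpty then st else popA i (prices.getD i 0) st.1 st.2
  ((i, prices.getD i 0) :: s.1, s.2)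

-- the final loop walks Python's stack bottom-to-top (= our reversed list), with i = len(prices) - 1
def solution (prices : List Int) : List Int :=
  let n := prices.length
  let s := (List.range n).foldl (stepA prices) ([], List.replicate n 0)
  s.1.reverse.foldl (fun ans p => ans.set p.1 (((n : Int) - 1) - (p.1 : Int))) s.2

-- ===== PORT B =====
-- the inner `for j in range(i+1, n)` scan with break; d = n-1-i if no strictly smaller price follows
def scanB (prices : List Int) (pi0 : Int) (i j n : Nat) : Int :=
  if _h : j < n then
    if prices.getD j 0 < pi0 then (j : Int) - (i : Int)
    else scanB prices pi0 i (j + 1) n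
  else ((n : Int) - 1) - (i : Int)
termination_by n - j

def solution_alt (prices : List Int) : List Int :=
  let n := prices.length
  (List.range n).map (fun i => scanB prices (prices.getD i 0) i (i + 1) n)

-- ===== PRECONDITION & SPEC =====
def Spec_solution (prices : List Int) (out : List Int) : Prop := out = solution_alt prices
instance (prices : List Int) (out : List Int) : Decidable (Spec_solution prices out) := by unfold Spec_solution; infer_instance

-- ===== CLAIM (what is proved, stated in full; the proofs are below) =====
def Claim_equal_solution : Prop := ∀ (prices : List Int), Dom_solution prices → Spec_solution prices (solution prices)

-- ===== LEMMAS AND PROOFS =====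

-- price at index j (every access in both ports is in range)
def pv (prices : List Int) (j : Nat) : Int := prices.getD j 0

-- first index m > j with prices[m] < prices[j] (the "first drop" of index j)
def fd (prices : List Int) (j : Nat) : Option Nat :=
  (List.range' (j + 1) (prices.length - (j + 1))).find? (fun m => pv prices m < pv prices j)

-- indices still on the stack after processing 0..i-1, top (largest index) first
def live (prices : List Int) (i : Nat) : List Nat :=
  ((List.range i).filter
    (fun j => decide (∀ m, m < i → j < m → pv prices j ≤ pv prices m))).reverse

-- the answer array after processing 0..i-1
def ansS (prices : List Int) (i : Nat) : List Int :=
  (List.range prices.length).map (fun j =>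
    match fd prices j with
    | some m => if m < i then (m : Int) - (j : Int) else 0
    | none => 0)

lemma find?_range'_first {p : Nat → Bool} {s len i : Nat}
    (h1 : s ≤ i) (h2 : i < s + len) (h3 : p i = true)
    (h4 : ∀ m, s ≤ m → m < i → p m = false) :
    (List.range' s len).find? p = some i := by
  induction len generalizing s with
  | zero => omega
  | succ n ih =>
    rw [List.range'_succ]
    rcases Nat.eq_or_lt_of_le h1 with rfl | hlt
    · rw [List.find?_cons_of_pos h3]
    · rw [List.find?_cons_of_neg (by simp [h4 s le_rfl hlt])]
      exact ih (by omega) (by omega) (fun m hm => h4 m (by omega))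

lemma find?_range'_spec {p : Nat → Bool} {s len i : Nat}
    (h : (List.range' s len).find? p = some i) :
    s ≤ i ∧ i < s + len ∧ p i = true ∧ ∀ m, s ≤ m → m < i → p m = false := by
  induction len generalizing s with
  | zero => simp [List.range'] at h
  | succ n ih =>
    rw [List.range'_succ] at h
    by_cases hp : p s = true
    · rw [List.find?_cons_of_pos hp] at h
      have hsi : s = i := by injection h
      subst hsi
      exact ⟨le_rfl, by omega, hp, fun m hm hm' => by omega⟩
    · rw [List.find?_cons_of_neg (by simpa using hp)] at h
      obtain ⟨a, b, c, d⟩ := ih h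
      refine ⟨by omega, by omega, c, fun m hm hm' => ?_⟩
      rcases Nat.eq_or_lt_of_le hm with rfl | hlt'
      · simpa using hp
      · exact d m (by omega) hm'

lemma mem_live {prices : List Int} {i j : Nat} :
    j ∈ live prices i ↔ j < i ∧ ∀ m, m < i → j < m → pv prices j ≤ pv prices m := by
  simp [live, List.mem_filter, List.mem_range]

lemma fd_eq_some {prices : List Int} {j i : Nat} (hj : j < i) (hi : i < prices.length)
    (halive : ∀ m, m < i → j < m → pv prices j ≤ pv prices m)
    (hdrop : pv prices i < pv prices j) : fd prices j = some i := by
  apply find?_range'_first (by omega) (by omega) (by simpa using hdrop)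
  intro m hm hm'
  simp only [decide_eq_false_iff_not, not_lt]
  exact halive m (by omega) (by omega)

lemma fd_some_spec {prices : List Int} {j i : Nat} (h : fd prices j = some i) :
    j < i ∧ i < prices.length ∧ pv prices i < pv prices j ∧
      ∀ m, m < i → j < m → pv prices j ≤ pv prices m := by
  obtain ⟨a, b, c, d⟩ := find?_range'_spec h
  refine ⟨by omega, by omega, by simpa using c, fun m hm hm' => ?_⟩
  have := d m (by omega) (by omega)
  simpa using this

lemma fd_eq_none {prices : List Int} {j : Nat} (hj : j < prices.length) :
    fd prices j = none ↔ ∀ m, m < prices.length → j < m → pv prices j ≤ pv prices m := by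
  constructor
  · intro h m hm hm'
    have := List.find?_eq_none.1 h m (List.mem_range'_1.2 ⟨by omega, by omega⟩)
    simpa using this
  · intro h
    apply List.find?_eq_none.2
    intro m hm
    have hm' := List.mem_range'_1.1 hm
    simp only [decide_eq_true_eq, not_lt]
    exact h m (by omega) (by omega)

-- popA on a value-nonincreasing (head-first) stack = filter + batched sets
lemma popA_eq (i : Nat) (k : Int) (l : List (Nat × Int)) (ans : List Int)
    (hmono : l.Pairwise (fun a b => b.2 ≤ a.2)) :
    popA i k l ans =
      (l.filter (fun p => decide (p.2 ≤ k)),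
       (l.filter (fun p => decide (k < p.2))).foldl
         (fun a p => a.set p.1 ((i : Int) - (p.1 : Int))) ans) := by
  induction l generalizing ans with
  | nil => simp [popA]
  | cons hd tl ih =>
    obtain ⟨j, v⟩ := hd
    rw [List.pairwise_cons] at hmono
    by_cases hk : k < v
    · simp only [popA, if_pos hk]
      rw [ih _ hmono.2]
      simp [List.filter_cons, hk, not_le.2 hk]
    · simp only [popA, if_neg hk]
      push_neg at hk
      have h1 : ∀ p ∈ tl, p.2 ≤ k := fun p hp => le_trans (hmono.1 p hp) hk
      have hfilt1 : tl.filter (fun p => decide (p.2 ≤ k)) = tl :=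
        List.filter_eq_self.2 (fun p hp => by simpa using h1 p hp)
      have hfilt2 : tl.filter (fun p => decide (k < p.2)) = [] :=
        List.filter_eq_nil_iff.2 (fun p hp => by simpa using not_lt.2 (h1 p hp))
      simp [List.filter_cons, hk, not_lt.2 hk, hfilt1, hfilt2]

-- getElem? after a foldl of sets, where the written value is a function of the index
lemma foldl_set_getElem? (l : List Nat) (f : Nat → Int) (a : List Int) (q : Nat) :
    (l.foldl (fun acc j => acc.set j (f j)) a)[q]? =
      if q ∈ l ∧ q < a.length then some (f q) else a[q]? := by
  induction l generalizing a with
  | nil => simp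
  | cons hd tl ih =>
    simp only [List.foldl_cons]
    rw [ih, List.length_set]
    by_cases hmem : q ∈ tl
    · by_cases hlen : q < a.length <;> simp [hmem, hlen]
    · by_cases hq : q = hd
      · subst hq
        by_cases hlen : q < a.length <;>
          simp [hmem, hlen, List.getElem?_set]
      · simp [hmem, hq, List.getElem?_set, Ne.symm hq]

lemma live_pairwise (prices : List Int) (i : Nat) :
    (live prices i).Pairwise (fun a b => b ≤ a) := by
  apply List.Pairwise.reverse
  exact (List.pairwise_lt_range.imp (fun h => le_of_lt h)).filter _

lemma live_values_mono {prices : List Int} {i a b : Nat}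
    (ha : a ∈ live prices i) (hb : b ∈ live prices i) (hab : b ≤ a) :
    pv prices b ≤ pv prices a := by
  rcases Nat.eq_or_lt_of_le hab with rfl | hlt
  · exact le_rfl
  · exact (mem_live.1 hb).2 a (mem_live.1 ha).1 hlt

lemma live_succ (prices : List Int) (i : Nat) :
    live prices (i + 1) =
      i :: (live prices i).filter (fun j => decide (pv prices j ≤ pv prices i)) := by
  unfold live
  rw [List.range_succ, List.filter_append, List.reverse_append]
  have hi : (List.filter (fun j => decide (∀ m, m < i + 1 → j < m → pv prices j ≤ pv prices m)) [i]) = [i] := by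
    simp only [List.filter_cons, List.filter_nil]
    rw [if_pos]
    simp only [decide_eq_true_eq]
    intro m hm hm'; omega
  rw [hi]
  simp only [List.reverse_cons, List.reverse_nil, List.nil_append, List.cons_append,
    ← List.filter_reverse]
  congr 1
  rw [List.filter_filter]
  apply List.filter_congr
  intro j hj
  simp only [List.mem_reverse, List.mem_range] at hj
  rw [← Bool.decide_and, decide_eq_decide]
  constructor
  · intro h
    exact ⟨h i (by omega) hj, fun m hm hm' => h m (by omega) hm'⟩
  · rintro ⟨h1, h2⟩ m hm hm'
    rcases Nat.lt_succ_iff_lt_or_eq.1 hm with h | rfl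
    · exact h2 m h hm'
    · exact h1

lemma live_ne_nil {prices : List Int} {i : Nat} (hi : 0 < i) : live prices i ≠ [] := by
  intro h
  have : i - 1 ∈ live prices i := mem_live.2 ⟨by omega, fun m hm hm' => by omega⟩
  simp [h] at this

lemma ansS_length (prices : List Int) (i : Nat) : (ansS prices i).length = prices.length := by
  simp [ansS]

lemma ansS_getElem? {prices : List Int} {i q : Nat} (hq : q < prices.length) :
    (ansS prices i)[q]? =
      some (match fd prices q with
            | some m => if m < i then (m : Int) - (q : Int) else 0
            | none => 0) := by
  simp [ansS, hq]

lemma popped_iff {prices : List Int} {i q : Nat} (hi : i < prices.length) :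
    (q ∈ (live prices i).filter (fun j => decide (pv prices i < pv prices j))) ↔
      fd prices q = some i := by
  constructor
  · intro h
    rw [List.mem_filter] at h
    obtain ⟨hl, hv⟩ := h
    obtain ⟨hq, hal⟩ := mem_live.1 hl
    exact fd_eq_some hq hi hal (by simpa using hv)
  · intro h
    obtain ⟨hq, _, hdrop, hal⟩ := fd_some_spec h
    rw [List.mem_filter]
    exact ⟨mem_live.2 ⟨hq, hal⟩, by simpa using hdrop⟩

-- answer array update across one iteration
lemma ansS_succ (prices : List Int) (i : Nat) (hi : i < prices.length) :
    ((live prices i).filter (fun j => decide (pv prices i < pv prices j))).foldl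
        (fun a j => a.set j ((i : Int) - (j : Int))) (ansS prices i) = ansS prices (i + 1) := by
  apply List.ext_getElem?
  intro q
  rw [foldl_set_getElem? _ (fun j => (i : Int) - (j : Int)), ansS_length]
  by_cases hq : q < prices.length
  · rw [ansS_getElem? hq, ansS_getElem? hq]
    by_cases hmem : fd prices q = some i
    · rw [if_pos ⟨(popped_iff hi).2 hmem, hq⟩, hmem]
      simp
    · rw [if_neg (fun hc => hmem ((popped_iff hi).1 hc.1))]
      cases hfd : fd prices q with
      | none => rfl
      | some m =>
        have hmi : m ≠ i := fun hc => hmem (hc ▸ hfd)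
        show some (if m < i then (m : Int) - (q : Int) else 0) =
          some (if m < i + 1 then (m : Int) - (q : Int) else 0)
        by_cases hmlt : m < i
        · rw [if_pos hmlt, if_pos (by omega)]
        · rw [if_neg hmlt, if_neg (by omega)]
  · have h1 : (ansS prices i)[q]? = none := by
      rw [List.getElem?_eq_none_iff, ansS_length]; omega
    have h2 : (ansS prices (i + 1))[q]? = none := by
      rw [List.getElem?_eq_none_iff, ansS_length]; omega
    rw [if_neg (fun hc => hq hc.2), h1, h2]

-- the invariant: state of A's main fold after i iterations
lemma foldA_inv (prices : List Int) (i : Nat) (hi : i ≤ prices.length) :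
    (List.range i).foldl (stepA prices) ([], List.replicate prices.length 0) =
      ((live prices i).map (fun j => (j, pv prices j)), ansS prices i) := by
  induction i with
  | zero =>
    simp only [List.range_zero, List.foldl_nil, live, List.filter_nil,
      List.reverse_nil, List.map_nil]
    refine Prod.ext rfl ?_
    apply List.ext_getElem
    · simp [ansS]
    · intro q h1 h2
      simp only [ansS, List.getElem_replicate, List.getElem_map, List.getElem_range]
      cases hfd : fd prices q <;> simp
  | succ i ih =>
    have hi' : i < prices.length := by omega
    rw [List.range_succ, List.foldl_append, List.foldl_cons, List.foldl_nil, ih (by omega)]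
    by_cases hL : live prices i = []
    · have hz : i = 0 := by
        by_contra hne
        exact live_ne_nil (by omega) hL
      subst hz
      simp only [stepA, hL, List.map_nil, List.isEmpty_nil, if_pos]
      refine Prod.ext ?_ ?_
      · simp only [live_succ, hL, List.filter_nil, List.map_cons, List.map_nil]
        rfl
      · show ansS prices 0 = ansS prices 1
        unfold ansS
        apply List.map_congr_left
        intro j hj
        cases hfd : fd prices j with
        | none => rfl
        | some m =>
          have := (fd_some_spec hfd).1
          simp only
          rw [if_neg (by omega), if_neg (by omega)]
    · have hmono : ((live prices i).map (fun j => (j, pv prices j))).Pairwise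
          (fun a b => b.2 ≤ a.2) := by
        rw [List.pairwise_map]
        refine (live_pairwise prices i).imp_of_mem ?_
        intro a b ha hb hab
        exact live_values_mono ha hb hab
      have hne : ((live prices i).map (fun j => (j, pv prices j))).isEmpty = false := by
        simp [List.isEmpty_eq_false_iff, hL]
      simp only [stepA, hne, Bool.false_eq_true, if_neg, reduceCtorEq, not_false_eq_true]
      rw [popA_eq _ _ _ _ hmono]
      have hcomp1 :
          ((live prices i).map (fun j => (j, pv prices j))).filter
              (fun p => decide (p.2 ≤ prices.getD i 0)) =
            ((live prices i).filter (fun j => decide (pv prices j ≤ pv prices i))).map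
              (fun j => (j, pv prices j)) := by
        rw [List.filter_map]
        rfl
      have hcomp2 :
          ((live prices i).map (fun j => (j, pv prices j))).filter
              (fun p => decide (prices.getD i 0 < p.2)) =
            ((live prices i).filter (fun j => decide (pv prices i < pv prices j))).map
              (fun j => (j, pv prices j)) := by
        rw [List.filter_map]
        rfl
      refine Prod.ext ?_ ?_
      · show (i, prices.getD i 0) ::
            ((live prices i).map (fun j => (j, pv prices j))).filter
              (fun p => decide (p.2 ≤ prices.getD i 0)) =
          (live prices (i+1)).map (fun j => (j, pv prices j))
        rw [hcomp1, live_succ]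
        rfl
      · show (((live prices i).map (fun j => (j, pv prices j))).filter
              (fun p => decide (prices.getD i 0 < p.2))).foldl
            (fun a p => a.set p.1 ((i : Int) - (p.1 : Int))) (ansS prices i) = ansS prices (i+1)
        rw [hcomp2, List.foldl_map]
        exact ansS_succ prices i hi'

-- scanB computes first-drop minus i, or n-1-i if there is none
lemma scanB_eq (prices : List Int) (pi0 : Int) (i j n : Nat) :
    scanB prices pi0 i j n =
      match (List.range' j (n - j)).find? (fun m => decide (pv prices m < pi0)) with
      | some m => (m : Int) - (i : Int)
      | none => ((n : Int) - 1) - (i : Int) := by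
  by_cases h : j < n
  · rw [scanB, dif_pos h]
    have hrange : n - j = (n - (j + 1)) + 1 := by omega
    rw [hrange, List.range'_succ]
    by_cases hd : pv prices j < pi0
    · rw [List.find?_cons_of_pos (by simpa using hd)]
      rw [if_pos (by simpa [pv] using hd)]
    · rw [List.find?_cons_of_neg (by simpa using hd)]
      rw [if_neg (by simpa [pv] using hd)]
      exact scanB_eq prices pi0 i (j + 1) n
  · rw [scanB, dif_neg h]
    have hz : n - j = 0 := by omega
    simp [hz, List.range']
termination_by n - j

lemma solution_alt_getElem? (prices : List Int) (q : Nat) :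
    (solution_alt prices)[q]? =
      if q < prices.length
      then some (scanB prices (prices.getD q 0) q (q + 1) prices.length)
      else none := by
  by_cases hq : q < prices.length <;> simp [solution_alt, hq, List.getElem?_eq_none_iff]

-- the final pass over the remaining stack yields solution_alt
lemma final_eq (prices : List Int) :
    ((live prices prices.length).map (fun j => (j, pv prices j))).reverse.foldl
        (fun ans p => ans.set p.1 (((prices.length : Int) - 1) - (p.1 : Int)))
        (ansS prices prices.length) = solution_alt prices := by
  rw [← List.map_reverse, List.foldl_map]
  apply List.ext_getElem?
  intro q
  rw [foldl_set_getElem? _ (fun j => ((prices.length : Int) - 1) - (j : Int)), ansS_length,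
    solution_alt_getElem?]
  by_cases hq : q < prices.length
  · rw [if_pos hq, scanB_eq]
    show _ = some (match fd prices q with
      | some m => (m : Int) - (q : Int)
      | none => ((prices.length : Int) - 1) - (q : Int))
    by_cases hlive : q ∈ live prices prices.length
    · have hfd : fd prices q = none :=
        (fd_eq_none hq).2 (fun m hm hm' => (mem_live.1 hlive).2 m hm hm')
      rw [if_pos ⟨List.mem_reverse.2 hlive, hq⟩, hfd]
    · rw [if_neg (fun hc => hlive (List.mem_reverse.1 hc.1))]
      cases hfd : fd prices q with
      | none =>
        exact absurd (mem_live.2 ⟨hq, (fd_eq_none hq).1 hfd⟩) hlive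
      | some m =>
        have hm := fd_some_spec hfd
        rw [ansS_getElem? hq, hfd]
        show some (if m < prices.length then (m : Int) - (q : Int) else 0) =
          some ((m : Int) - (q : Int))
        rw [if_pos hm.2.1]
  · rw [if_neg hq, if_neg (fun hc => hq hc.2), List.getElem?_eq_none_iff.2]
    rw [ansS_length]; omega

-- ===== VERDICT (by name: the statement is the Claim_ definition above) =====
theorem solution_spec : Claim_equal_solution := by
  intro prices _
  unfold Spec_solution solution
  simp only
  rw [foldA_inv prices prices.length le_rfl]
  exact final_eq prices
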